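-- pv_equiv track=rewrite | github.com/rami6/Algorithm | 001_BinaryGap.py | solution
-- ===== SOURCE A (Python) =====
-- def solution(N):
--     bin_N = bin(N)
--     str_bin_N = str(bin_N)[2:]
--
--     zero_max = 0
--     one_inds = []
--
--     i = 0
--     while i < len(str_bin_N):
--         ind = str_bin_N.find('1', i)
--         if ind >= 0:
--             one_inds.append(ind)
--             i = ind + 1
--         else:
--             break
--
--     for i in range(1, len(one_inds)):
--         zeros = one_inds[i] - one_inds[i - 1] - 1
--         zero_max = max(zero_max, zeros)
--
--     return zero_max
-- ===== SOURCE B (Python) =====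
-- def solution(N):
--     s = str(bin(N))[2:]
--     best = 0
--     count = 0
--     seen = False
--     for c in s:
--         if c == '1':
--             if count > best:
--                 best = count
--             count = 0
--             seen = True
--         elif seen:
--             count += 1
--     return best
-- ===== Notes on version B (the rewrite author's own statement) =====
-- stated objective: simpler
-- what changed: Replaced the two-phase algorithm (repeated str.find to collect all '1' indices into a list, then a second indexed loop over adjacent pairs) by a single pass over the binary string that keeps a running zero count since the last '1' and flushes it into the maximum at each '1'.
import Mathlib
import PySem

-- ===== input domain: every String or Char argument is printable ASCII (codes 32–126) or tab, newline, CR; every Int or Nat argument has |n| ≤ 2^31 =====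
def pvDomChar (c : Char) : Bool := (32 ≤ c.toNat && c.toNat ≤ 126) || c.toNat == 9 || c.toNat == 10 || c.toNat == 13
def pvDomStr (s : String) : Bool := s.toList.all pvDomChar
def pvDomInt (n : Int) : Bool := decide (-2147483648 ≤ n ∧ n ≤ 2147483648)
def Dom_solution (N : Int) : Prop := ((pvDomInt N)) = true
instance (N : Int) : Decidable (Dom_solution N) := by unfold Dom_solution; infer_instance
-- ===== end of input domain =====

-- B replaces A's two-phase algorithm (collect all '1' indices with repeated str.find, then
-- scan adjacent index pairs) by a single pass that counts zeros since the last '1'.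

-- ===== PORT A =====
-- the while-loop: i tracked as Python int, ind = str_bin_N.find('1', i); fuel = len+1 is
-- provably enough iterations since each step moves i past the '1' just found
def findOnes (s : List Char) : Nat → Int → List Int
  | 0, _ => []
  | fuel + 1, i =>
    if i < (s.length : Int) then
      let ind := PySem.Chars.findFrom s ['1'] i none
      if 0 ≤ ind then ind :: findOnes s fuel (ind + 1) else []
    else []

def solution (N : Int) : Int :=
  let strBinN := (PySem.Int.pyBin N).toList          -- str(bin(N)) (str of a str is itself)
  let s := PySem.List.slice strBinN (some 2) none    -- [2:]
  let oneInds := findOnes s (s.length + 1) 0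
  List.foldl
    (fun zeroMax i =>
      max zeroMax (PySem.List.pyGetD oneInds i 0 - PySem.List.pyGetD oneInds (i - 1) 0 - 1))
    0 (PySem.List.pyRange 1 (oneInds.length : Int) 1)

-- ===== PORT B =====
def solution_alt (N : Int) : Int :=
  let s := PySem.List.slice ((PySem.Int.pyBin N).toList) (some 2) none
  (s.foldl
    (fun (st : Int × Int × Bool) c =>
      if c = '1' then (if st.2.1 > st.1 then st.2.1 else st.1, 0, true)
      else if st.2.2 then (st.1, st.2.1 + 1, st.2.2) else st)
    (0, 0, false)).1

-- ===== PRECONDITION & SPEC =====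
def Spec_solution (N : Int) (out : Int) : Prop := out = solution_alt N
instance (N : Int) (out : Int) : Decidable (Spec_solution N out) := by unfold Spec_solution; infer_instance

-- ===== CLAIM (what is proved, stated in full; the proofs are below) =====
def Claim_equal_solution : Prop := ∀ (N : Int), Dom_solution N → Spec_solution N (solution N)

-- ===== LEMMAS AND PROOFS =====

-- relative positions (as Python ints) of the '1' characters of a char list
def onesI : List Char → List Int
  | [] => []
  | c :: t => if c = '1' then 0 :: (onesI t).map (· + 1) else (onesI t).map (· + 1)

-- A's second loop, rephrased on the index list: fold of max over adjacent gaps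
def pairFoldI : Int → List Int → Int → Int
  | _, [], best => best
  | prev, p :: ps, best => pairFoldI p ps (max best (p - prev - 1))

-- B's loop once a '1' has been seen
def gapFold : List Char → Int → Int → Int
  | [], _, best => best
  | c :: t, count, best =>
    if c = '1' then gapFold t 0 (max best count) else gapFold t (count + 1) best

theorem onesI_nonneg (t : List Char) : ∀ p ∈ onesI t, 0 ≤ p := by
  induction t with
  | nil => simp [onesI]
  | cons c t ih =>
    intro p hp
    by_cases hc : c = '1'
    · simp only [onesI, if_pos hc, List.mem_cons, List.mem_map] at hp
      rcases hp with rfl | ⟨q, hq, rfl⟩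
      · omega
      · have := ih q hq; omega
    · simp only [onesI, if_neg hc, List.mem_map] at hp
      rcases hp with ⟨q, hq, rfl⟩; have := ih q hq; omega

theorem pairFoldI_shift (ps : List Int) : ∀ (prev d best : Int),
    pairFoldI (prev + d) (ps.map (· + d)) best = pairFoldI prev ps best := by
  induction ps with
  | nil => intro prev d best; simp [pairFoldI]
  | cons p ps ih =>
    intro prev d best
    simp only [List.map_cons, pairFoldI]
    have h : p + d - (prev + d) - 1 = p - prev - 1 := by ring
    rw [h, ih]

theorem gapFold_eq_pairFoldI (t : List Char) : ∀ (count best : Int),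
    gapFold t count best = pairFoldI (-(count + 1)) (onesI t) best := by
  induction t with
  | nil => intro count best; simp [gapFold, onesI, pairFoldI]
  | cons c t ih =>
    intro count best
    by_cases hc : c = '1'
    · simp only [gapFold, onesI]
      rw [if_pos hc, if_pos hc]
      simp only [pairFoldI]
      have h : (0 : Int) - -(count + 1) - 1 = count := by ring
      rw [h, ih 0]
      have := pairFoldI_shift (onesI t) (-1) 1 (max best count)
      simpa using this.symm
    · simp only [gapFold, onesI]
      rw [if_neg hc, if_neg hc, ih (count + 1)]
      have := pairFoldI_shift (onesI t) (-(count + 1 + 1)) 1 best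
      have h : -(count + 1 + 1) + 1 = -(count + 1) := by ring
      rw [h] at this
      rw [this]

-- B's fold, once seen = true, is gapFold
theorem foldB_seen (t : List Char) : ∀ (count best : Int),
    (t.foldl
      (fun (st : Int × Int × Bool) c =>
        if c = '1' then (if st.2.1 > st.1 then st.2.1 else st.1, 0, true)
        else if st.2.2 then (st.1, st.2.1 + 1, st.2.2) else st)
      (best, count, true)).1 = gapFold t count best := by
  induction t with
  | nil => intro count best; simp [gapFold]
  | cons c t ih =>
    intro count best
    by_cases hc : c = '1'
    · simp only [List.foldl_cons, gapFold]
      rw [if_pos hc, if_pos hc, ih]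
      have h : (if count > best then count else best) = max best count := by
        rcases lt_or_ge best count with h | h
        · simp [h, max_eq_right h.le]
        · have : ¬ count > best := not_lt.mpr h
          simp [this, max_eq_left h]
      rw [h]
    · simp only [List.foldl_cons, gapFold]
      rw [if_neg hc, if_neg hc]
      simpa using ih (count + 1) best

-- B's whole fold equals the pair fold over the '1' positions
theorem foldB_main (t : List Char) :
    (t.foldl
      (fun (st : Int × Int × Bool) c =>
        if c = '1' then (if st.2.1 > st.1 then st.2.1 else st.1, 0, true)
        else if st.2.2 then (st.1, st.2.1 + 1, st.2.2) else st)
      (0, 0, false)).1 =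
    (match onesI t with | [] => 0 | p :: ps => pairFoldI p ps 0) := by
  induction t with
  | nil => simp [onesI]
  | cons c t ih =>
    by_cases hc : c = '1'
    · simp only [List.foldl_cons, onesI]
      rw [if_pos hc, if_pos hc]
      have h0 : (if (0 : Int) > 0 then (0 : Int) else 0) = 0 := by simp
      rw [h0, foldB_seen t 0 0, gapFold_eq_pairFoldI]
      simp only []
      have := pairFoldI_shift (onesI t) (-1) 1 (max 0 (0 - 0 - 1))
      have h1 : max (0 : Int) (0 - 0 - 1) = 0 := by simp
      rw [h1] at this
      simpa using this.symm
    · simp only [List.foldl_cons, onesI]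
      rw [if_neg hc, if_neg hc]
      rw [if_neg (by simp)]
      rw [ih]
      cases h : onesI t with
      | nil => simp
      | cons p ps =>
        simp only [List.map_cons]
        exact (pairFoldI_shift ps p 1 0).symm

-- ['1'] as a prefix means the head is '1'
theorem one_prefix_iff (u : List Char) : ['1'] <+: u ↔ ∃ v, u = '1' :: v := by
  cases u with
  | nil => simp [List.prefix_iff_eq_take]
  | cons d t =>
    constructor
    · intro h; rcases h with ⟨v, hv⟩; simp at hv; exact ⟨t, by simp [← hv.1]⟩
    · rintro ⟨v, hv⟩; simp at hv; simp [hv.1, List.prefix_cons_iff]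

-- find points at m when m carries the first occurrence
theorem find_eq_of (s : List Char) (m : Nat) (hm : ['1'] <+: s.drop m)
    (hmin : ∀ i < m, ¬ ['1'] <+: s.drop i) : PySem.Chars.find s ['1'] = (m : Int) := by
  have hinf : ['1'] <:+: s := (hm.isInfix).trans (List.drop_suffix m s).isInfix
  have h0 : 0 ≤ PySem.Chars.find s ['1'] := (PySem.Chars.find_nonneg_iff s ['1']).mpr hinf
  obtain ⟨h1, h2⟩ := PySem.Chars.find_spec h0
  rcases lt_trichotomy (PySem.Chars.find s ['1']).toNat m with h | h | h
  · exact absurd h1 (hmin _ h)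
  · omega
  · exact absurd hm (h2 m h)

theorem find_cons (c : Char) (t : List Char) :
    PySem.Chars.find (c :: t) ['1'] =
      if c = '1' then 0
      else if PySem.Chars.find t ['1'] = -1 then -1 else PySem.Chars.find t ['1'] + 1 := by
  by_cases hc : c = '1'
  · rw [if_pos hc]
    apply find_eq_of (c :: t) 0 ?_ (by omega)
    rw [List.drop_zero, one_prefix_iff]
    exact ⟨t, by rw [hc]⟩
  · rw [if_neg hc]
    by_cases hf : PySem.Chars.find t ['1'] = -1
    · rw [if_pos hf]
      have hni : ¬ ['1'] <:+: t := (PySem.Chars.find_eq_neg_one_iff t ['1']).mp hf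
      apply (PySem.Chars.find_eq_neg_one_iff (c :: t) ['1']).mpr
      intro h
      rcases List.mem_cons.mp ((List.singleton_infix_iff '1' (c :: t)).mp h) with h1 | h1
      · exact hc h1.symm
      · exact hni ((List.singleton_infix_iff '1' t).mpr h1)
    · rw [if_neg hf]
      have h0 : 0 ≤ PySem.Chars.find t ['1'] := by
        have := PySem.Chars.neg_one_le_find t ['1']
        omega
      obtain ⟨h1, h2⟩ := PySem.Chars.find_spec h0
      set m := (PySem.Chars.find t ['1']).toNat with hmdef
      have : PySem.Chars.find (c :: t) ['1'] = ((m + 1 : Nat) : Int) := by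
        apply find_eq_of
        · simpa using h1
        · intro i hi
          cases i with
          | zero =>
            simp only [List.drop_zero]
            rw [one_prefix_iff]
            rintro ⟨v, hv⟩
            exact hc (by simpa using congrArg (List.head? ·) hv)
          | succ j => simpa using h2 j (by omega)
      rw [this]; push_cast; omega

-- find returns the head of onesI (or -1)
theorem find_ones_head (t : List Char) :
    PySem.Chars.find t ['1'] = (onesI t).headD (-1) := by
  induction t with
  | nil =>
    simp only [onesI, List.headD_nil]
    apply (PySem.Chars.find_eq_neg_one_iff [] ['1']).mpr
    simp
  | cons c t ih =>
    rw [find_cons]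
    by_cases hc : c = '1'
    · simp [hc, onesI]
    · rw [if_neg hc]
      simp only [onesI]
      rw [if_neg hc]
      cases h : onesI t with
      | nil => simp [ih, h]
      | cons p ps =>
        have hp : 0 ≤ p := onesI_nonneg t p (by rw [h]; exact List.mem_cons_self ..)
        rw [ih, h]
        simp only [List.headD_cons, List.map_cons]
        rw [if_neg (by omega)]

-- decomposing onesI at its head
theorem onesI_cons_drop (t : List Char) (p : Int) (ps : List Int) (h : onesI t = p :: ps) :
    ∃ k : Nat, p = (k : Int) ∧ k < t.length ∧
      ps = (onesI (t.drop (k + 1))).map (· + ((k : Int) + 1)) := by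
  induction t generalizing p ps with
  | nil => simp [onesI] at h
  | cons c t ih =>
    by_cases hc : c = '1'
    · rw [onesI.eq_def] at h
      simp only [if_pos hc] at h
      obtain ⟨hp, hps⟩ := List.cons.inj h
      refine ⟨0, hp.symm, by simp, ?_⟩
      simpa using hps.symm
    · rw [onesI.eq_def] at h
      simp only [if_neg hc] at h
      cases ht : onesI t with
      | nil => rw [ht] at h; simp at h
      | cons q qs =>
        rw [ht] at h
        simp only [List.map_cons] at h
        obtain ⟨hp, hps⟩ := List.cons.inj h
        obtain ⟨k, hk1, hk2, hk3⟩ := ih q qs ht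
        refine ⟨k + 1, by omega, by simp; omega, ?_⟩
        rw [← hps, hk3]
        simp only [List.map_map, List.drop_succ_cons]
        apply List.map_congr_left
        intro x _
        simp only [Function.comp_apply]
        push_cast; ring

-- the while loop collects exactly the (absolute) '1' positions from k on
theorem findOnes_eq (s : List Char) (fuel : Nat) : ∀ k : Nat, k ≤ s.length →
    s.length - k < fuel →
    findOnes s fuel (k : Int) = (onesI (s.drop k)).map (· + (k : Int)) := by
  induction fuel with
  | zero => intro k _ h; omega
  | succ fuel ih =>
    intro k hk hfuel
    by_cases hlt : k < s.length
    · simp only [findOnes]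
      rw [if_pos (show ((k : Nat) : Int) < ((s.length : Nat) : Int) by exact_mod_cast hlt)]
      rw [PySem.Chars.findFrom_natCast s ['1'] k hk, find_ones_head]
      cases h : onesI (s.drop k) with
      | nil => simp
      | cons p ps =>
        obtain ⟨k', hp, hk', hps⟩ := onesI_cons_drop _ p ps h
        have hlen : (s.drop k).length = s.length - k := List.length_drop ..
        rw [hlen] at hk'
        subst hp
        simp only [List.headD_cons]
        rw [if_neg (show ¬ ((k' : Nat) : Int) = -1 by omega)]
        rw [if_pos (show (0 : Int) ≤ (k : Int) + (k' : Int) by omega)]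
        have hcast : (k : Int) + (k' : Int) + 1 = ((k + k' + 1 : Nat) : Int) := by push_cast; omega
        rw [hcast, ih (k + k' + 1) (by omega) (by omega)]
        rw [List.map_cons]
        congr 1
        · omega
        · rw [hps, List.drop_drop, List.map_map]
          have harg : k + (k' + 1) = k + k' + 1 := by omega
          rw [harg]
          apply List.map_congr_left
          intro x _
          simp only [Function.comp_apply]
          push_cast; ring
    · have hk' : k = s.length := by omega
      simp only [findOnes]
      rw [if_neg (show ¬ ((k : Nat) : Int) < ((s.length : Nat) : Int) by exact_mod_cast hlt)]
      rw [hk', List.drop_length]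
      simp [onesI]

-- A's second loop over range(1, len) equals pairFoldI
theorem foldA_eq (j : Nat) : ∀ (l : List Int) (k : Nat) (acc : Int), 1 ≤ k →
    k ≤ l.length → j = l.length - k →
    List.foldl
      (fun best i =>
        max best (PySem.List.pyGetD l i 0 - PySem.List.pyGetD l (i - 1) 0 - 1))
      acc (PySem.List.pyRange (k : Int) (l.length : Int) 1) =
    pairFoldI (l.getD (k - 1) 0) (l.drop k) acc := by
  induction j with
  | zero =>
    intro l k acc h1 h2 hj
    have hk : k = l.length := by omega
    rw [PySem.List.pyRange_one_eq_nil (by omega)]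
    rw [hk, List.drop_length]
    simp [pairFoldI]
  | succ j ih =>
    intro l k acc h1 h2 hj
    have hlt : k < l.length := by omega
    rw [PySem.List.pyRange_one_cons (show (k : Int) < (l.length : Int) by exact_mod_cast hlt)]
    rw [List.foldl_cons]
    have hg1 : PySem.List.pyGetD l ((k : Nat) : Int) 0 = l.getD k 0 :=
      PySem.List.pyGetD_natCast l k 0
    have hc1 : ((k : Nat) : Int) - 1 = (((k - 1 : Nat) : Nat) : Int) := by omega
    have hg2 : PySem.List.pyGetD l (((k : Nat) : Int) - 1) 0 = l.getD (k - 1) 0 := by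
      rw [hc1, PySem.List.pyGetD_natCast]
    rw [hg1, hg2]
    have hc2 : ((k : Nat) : Int) + 1 = (((k + 1 : Nat) : Nat) : Int) := by push_cast; ring
    rw [hc2, ih l (k + 1) _ (by omega) (by omega) (by omega)]
    have hdrop : l.drop k = l.getD k 0 :: l.drop (k + 1) := by
      rw [List.drop_eq_getElem_cons hlt, List.getD_eq_getElem l 0 hlt]
    rw [hdrop]
    simp only [pairFoldI, Nat.add_sub_cancel]

-- ===== VERDICT (by name: the statement is the Claim_ definition above) =====
theorem solution_spec : Claim_equal_solution := by
  intro N _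
  unfold Spec_solution solution solution_alt
  simp only []
  set s := PySem.List.slice ((PySem.Int.pyBin N).toList) (some 2) none with hs
  have hfo : findOnes s (s.length + 1) 0 = onesI s := by
    have h := findOnes_eq s (s.length + 1) 0 (by omega) (by omega)
    simpa using h
  rw [hfo, foldB_main]
  cases h : onesI s with
  | nil => simp [PySem.List.pyRange_one_eq_nil]
  | cons p ps =>
    have h2 := foldA_eq ps.length (p :: ps) 1 0 (by omega) (by simp) (by simp)
    simp only [Nat.cast_one] at h2
    rw [h2]
    simp []
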